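-- pv_equiv track=rewrite | github.com/LukaMugosa/RSA---homework-in-python | lib/stringRSA.py | mergeBlocks
-- ===== SOURCE A (Python) =====
-- def mergeBlocks(blocks, blkSz):
-- 	glue = 1
-- 	while blkSz > 0:
-- 		glue *= 10
-- 		blkSz-= 1
--
-- 	merged = 0
-- 	for block in blocks:
-- 		merged = merged*glue + block
-- 	return merged
-- ===== SOURCE B (Python) =====
-- def mergeBlocks(blocks, blkSz):
--     glue = 10 ** max(blkSz, 0)
--     result = 0
--     place = 1
--     for block in reversed(list(blocks)):
--         result += block * place
--         place *= glue
--     return result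
-- ===== Notes on version B (the rewrite author's own statement) =====
-- stated objective: alternative
-- what changed: Replaces the decrement-loop glue computation with a closed-form power and the forward Horner accumulation with a reverse traversal maintaining a place-value multiplier.
import Mathlib
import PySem

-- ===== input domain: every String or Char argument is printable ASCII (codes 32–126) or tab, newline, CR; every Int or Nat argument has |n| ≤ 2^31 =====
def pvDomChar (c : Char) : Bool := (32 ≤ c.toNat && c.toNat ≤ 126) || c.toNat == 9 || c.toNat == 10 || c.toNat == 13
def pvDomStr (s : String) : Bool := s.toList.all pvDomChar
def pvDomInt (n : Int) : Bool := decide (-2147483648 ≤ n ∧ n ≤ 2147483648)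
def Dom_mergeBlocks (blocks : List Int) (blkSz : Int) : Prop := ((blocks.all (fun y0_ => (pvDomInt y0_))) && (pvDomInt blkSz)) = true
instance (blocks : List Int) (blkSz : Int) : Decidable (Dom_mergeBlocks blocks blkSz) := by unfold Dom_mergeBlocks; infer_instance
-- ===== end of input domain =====

-- B replaces A's glue decrement-loop by a closed-form power and A's forward Horner
-- accumulation by a reverse traversal with a place-value multiplier (alternative decomposition).


-- ===== PORT A =====
-- 'while blkSz > 0: glue *= 10; blkSz -= 1' as structural recursion on the counter
def mergeBlocksGlueLoop (blkSz : Int) (glue : Int) : Int :=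
  if h : blkSz > 0 then mergeBlocksGlueLoop (blkSz - 1) (glue * 10) else glue
termination_by blkSz.toNat
decreasing_by omega

def mergeBlocks (blocks : List Int) (blkSz : Int) : Int :=
  let glue := mergeBlocksGlueLoop blkSz 1
  blocks.foldl (fun merged block => merged * glue + block) 0

-- ===== PORT B =====
def mergeBlocks_alt (blocks : List Int) (blkSz : Int) : Int :=
  let glue : Int := 10 ^ (max blkSz 0).toNat
  let s := blocks.reverse.foldl
    (fun (s : Int × Int) block => (s.1 + block * s.2, s.2 * glue)) (0, 1)
  s.1

-- ===== PRECONDITION & SPEC =====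
def Spec_mergeBlocks (blocks : List Int) (blkSz : Int) (out : Int) : Prop := out = mergeBlocks_alt blocks blkSz
instance (blocks : List Int) (blkSz : Int) (out : Int) : Decidable (Spec_mergeBlocks blocks blkSz out) := by unfold Spec_mergeBlocks; infer_instance

-- ===== CLAIM (what is proved, stated in full; the proofs are below) =====
def Claim_equal_mergeBlocks : Prop := ∀ (blocks : List Int) (blkSz : Int), Dom_mergeBlocks blocks blkSz → Spec_mergeBlocks blocks blkSz (mergeBlocks blocks blkSz)

-- ===== LEMMAS AND PROOFS =====

theorem glueLoop_eq (n : Nat) : ∀ (blkSz glue : Int), blkSz.toNat = n →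
    mergeBlocksGlueLoop blkSz glue = glue * 10 ^ (max blkSz 0).toNat := by
  induction n with
  | zero =>
    intro blkSz glue h
    rw [mergeBlocksGlueLoop]
    have hle : ¬ blkSz > 0 := by omega
    simp [hle]
    have : (max blkSz 0).toNat = 0 := by omega
    simp [this]
  | succ k ih =>
    intro blkSz glue h
    rw [mergeBlocksGlueLoop]
    have hpos : blkSz > 0 := by omega
    simp only [hpos, dite_true]
    rw [ih (blkSz - 1) (glue * 10) (by omega)]
    have h1 : (max blkSz 0).toNat = (max (blkSz - 1) 0).toNat + 1 := by omega
    rw [h1, pow_succ]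
    ring

theorem placeValue_eq (g : Int) (ys : List Int) : ∀ (r p : Int),
    (ys.foldl (fun (s : Int × Int) block => (s.1 + block * s.2, s.2 * g)) (r, p)).1
      = r + p * ys.reverse.foldl (fun merged block => merged * g + block) 0 := by
  induction ys with
  | nil => intro r p; simp
  | cons b t ih =>
    intro r p
    simp only [List.foldl_cons, List.reverse_cons]
    rw [ih, List.foldl_append]
    simp only [List.foldl_cons, List.foldl_nil]
    ring

-- ===== VERDICT (by name: the statement is the Claim_ definition above) =====
theorem mergeBlocks_spec : Claim_equal_mergeBlocks := by
  intro blocks blkSz _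
  unfold Spec_mergeBlocks mergeBlocks mergeBlocks_alt
  rw [glueLoop_eq blkSz.toNat blkSz 1 rfl, placeValue_eq]
  simp
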